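-- pv_equiv track=rewrite | github.com/ElliottSax/engineer | training_iterations/training_iteration71.py | longest_subarray_absolute_diff
-- ===== SOURCE A (Python) =====
-- from collections import deque
--
-- def longest_subarray_absolute_diff(nums, limit):
--     """Longest subarray with max absolute diff <= limit."""
--     min_dq = deque()
--     max_dq = deque()
--     left = 0
--     result = 0
--
--     for right, num in enumerate(nums):
--         while min_dq and nums[min_dq[-1]] > num:
--             min_dq.pop()
--         min_dq.append(right)
--
--         while max_dq and nums[max_dq[-1]] < num:
--             max_dq.pop()
--         max_dq.append(right)
--
--         while nums[max_dq[0]] - nums[min_dq[0]] > limit: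
--             left += 1
--             if min_dq[0] < left:
--                 min_dq.popleft()
--             if max_dq[0] < left:
--                 max_dq.popleft()
--
--         result = max(result, right - left + 1)
--
--     return result
-- ===== SOURCE B (Python) =====
-- def longest_subarray_absolute_diff(nums, limit):
--     """Longest subarray with max absolute diff <= limit (plain sliding window: recompute window min/max, no deques)."""
--     left = 0
--     result = 0
--     for right in range(len(nums)):
--         window = nums[left:right + 1]
--         while max(window) - min(window) > limit:
--             left += 1
--             window = nums[left:right + 1]
--         result = max(result, right - left + 1)
--     return result
-- ===== Notes on version B (the rewrite author's own statement) =====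
-- stated objective: simpler
-- what changed: Replaced the two monotonic deques by a plain sliding window that recomputes min/max of the current window slice directly, removing the deque bookkeeping entirely.
import Mathlib
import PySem

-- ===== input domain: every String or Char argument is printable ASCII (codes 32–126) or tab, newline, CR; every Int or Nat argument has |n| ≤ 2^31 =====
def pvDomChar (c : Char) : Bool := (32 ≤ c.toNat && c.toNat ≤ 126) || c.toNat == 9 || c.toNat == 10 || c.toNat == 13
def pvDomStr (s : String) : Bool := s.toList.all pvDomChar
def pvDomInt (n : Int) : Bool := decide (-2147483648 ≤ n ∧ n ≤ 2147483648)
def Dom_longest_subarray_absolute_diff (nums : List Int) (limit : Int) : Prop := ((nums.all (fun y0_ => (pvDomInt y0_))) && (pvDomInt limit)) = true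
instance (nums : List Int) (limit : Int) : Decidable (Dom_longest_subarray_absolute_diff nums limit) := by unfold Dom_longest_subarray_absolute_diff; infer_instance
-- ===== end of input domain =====

-- B replaces A's two monotonic deques by a plain sliding window that recomputes the
-- window slice's min/max directly (simpler, no deque bookkeeping); equivalence is about
-- the return value; neither program mutates its arguments.

-- ===== PORT A =====
-- nums[i]: every index A reads is a deque entry in [0, len nums) when the deque is
-- nonempty; under Pre_ the deques read are nonempty, so getD i 0 is exact there.
def pvGetI (nums : List Int) (i : Nat) : Int := nums.getD i 0

-- 'while dq and p(nums[dq[-1]]): dq.pop()' — drop elements from the back while p holds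
def pvPopBack (p : Nat → Bool) (dq : List Nat) : List Nat := (dq.reverse.dropWhile p).reverse

-- 'while nums[max_dq[0]] - nums[min_dq[0]] > limit: …' — fueled; under Pre_ the loop
-- makes at most `right` steps, so fuel right+1 never runs out (headD 0: IndexError side,
-- outside Pre_)
def pvShrinkA (nums : List Int) (limit : Int) : Nat → List Nat → List Nat → Nat → (List Nat × List Nat × Nat)
  | 0, minDq, maxDq, left => (minDq, maxDq, left)
  | fuel+1, minDq, maxDq, left =>
    if pvGetI nums (maxDq.headD 0) - pvGetI nums (minDq.headD 0) > limit then
      let left' := left + 1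
      pvShrinkA nums limit fuel
        (if minDq.headD 0 < left' then minDq.tail else minDq)
        (if maxDq.headD 0 < left' then maxDq.tail else maxDq) left'
    else (minDq, maxDq, left)

-- body of 'for right, num in enumerate(nums)'
def pvStepA (nums : List Int) (limit : Int) (st : List Nat × List Nat × Nat × Int) (right : Nat) :
    List Nat × List Nat × Nat × Int :=
  let minDq := pvPopBack (fun i => decide (pvGetI nums i > pvGetI nums right)) st.1 ++ [right]
  let maxDq := pvPopBack (fun i => decide (pvGetI nums i < pvGetI nums right)) st.2.1 ++ [right]
  let s := pvShrinkA nums limit (right+1) minDq maxDq st.2.2.1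
  (s.1, s.2.1, s.2.2, max st.2.2.2 ((right : Int) - (s.2.2 : Int) + 1))

def longest_subarray_absolute_diff (nums : List Int) (limit : Int) : Int :=
  ((List.range nums.length).foldl (pvStepA nums limit) ([], [], 0, 0)).2.2.2

-- ===== PORT B =====
-- nums[left:right+1]
def pvWin (nums : List Int) (left right : Nat) : List Int :=
  PySem.List.slice nums (some (left : Int)) (some ((right : Int) + 1))

-- 'while max(window) - min(window) > limit: left += 1' — fueled like A's shrink loop;
-- getD 0: ValueError side of max()/min() on an empty window, outside Pre_
def pvShrinkB (nums : List Int) (limit : Int) : Nat → Nat → Nat → Nat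
  | 0, left, _ => left
  | fuel+1, left, right =>
    let w := pvWin nums left right
    if ((PySem.List.max? w (fun y => y)).getD 0 - (PySem.List.min? w (fun y => y)).getD 0) > limit then
      pvShrinkB nums limit fuel (left+1) right
    else left

def pvStepB (nums : List Int) (limit : Int) (st : Nat × Int) (right : Nat) : Nat × Int :=
  let left := pvShrinkB nums limit (right+1) st.1 right
  (left, max st.2 ((right : Int) - (left : Int) + 1))

def longest_subarray_absolute_diff_alt (nums : List Int) (limit : Int) : Int :=
  ((List.range nums.length).foldl (pvStepB nums limit) (0, 0)).2

-- ===== PRECONDITION & SPEC =====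
-- On nonempty nums with limit < 0 the sliding window becomes empty and A raises
-- IndexError (B raises ValueError); Pre_ excludes exactly those inputs.
def Pre_longest_subarray_absolute_diff (nums : List Int) (limit : Int) : Prop :=
  nums = [] ∨ 0 ≤ limit
instance (nums : List Int) (limit : Int) : Decidable (Pre_longest_subarray_absolute_diff nums limit) := by
  unfold Pre_longest_subarray_absolute_diff; infer_instance

def pvWitness_longest_subarray_absolute_diff : List Int × Int := ([4, 1, 3, 2, 7], 2)

def Spec_longest_subarray_absolute_diff (nums : List Int) (limit : Int) (out : Int) : Prop := out = longest_subarray_absolute_diff_alt nums limit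
instance (nums : List Int) (limit : Int) (out : Int) : Decidable (Spec_longest_subarray_absolute_diff nums limit out) := by unfold Spec_longest_subarray_absolute_diff; infer_instance

-- ===== CLAIM (what is proved, stated in full; the proofs are below) =====
def Claim_equal_longest_subarray_absolute_diff : Prop := ∀ (nums : List Int) (limit : Int), Dom_longest_subarray_absolute_diff nums limit → Pre_longest_subarray_absolute_diff nums limit → Spec_longest_subarray_absolute_diff nums limit (longest_subarray_absolute_diff nums limit)

-- ===== LEMMAS AND PROOFS =====

-- The canonical content of a monotonic deque: indices i ∈ [left, right] whose value is
-- le-below every later value in the window (le = (≤) for the min deque, (≥) for the max deque).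
def pvDq (nums : List Int) (le : Int → Int → Bool) (left right : Nat) : List Nat :=
  (List.range (right+1)).filter
    (fun i => decide (left ≤ i) && (List.range (right+1)).all (fun j => !(decide (i < j)) || le (pvGetI nums i) (pvGetI nums j)))

def pvTot (le : Int → Int → Bool) : Prop := ∀ a b : Int, le a b = true ∨ le b a = true
def pvTrans (le : Int → Int → Bool) : Prop := ∀ a b c : Int, le a b = true → le b c = true → le a c = true


theorem pvTot_le : pvTot (fun a b => decide (a ≤ b)) := by
  intro a b; simp only [decide_eq_true_eq]; omega

theorem pvTrans_le : pvTrans (fun a b => decide (a ≤ b)) := by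
  intro a b c; simp only [decide_eq_true_eq]; omega

theorem pvTot_ge : pvTot (fun a b => decide (b ≤ a)) := by
  intro a b; simp only [decide_eq_true_eq]; omega

theorem pvTrans_ge : pvTrans (fun a b => decide (b ≤ a)) := by
  intro a b c; simp only [decide_eq_true_eq]; omega

theorem pvDq_mem (nums : List Int) (le : Int → Int → Bool) (left right i : Nat) :
    i ∈ pvDq nums le left right ↔
      (i ≤ right ∧ left ≤ i ∧ ∀ j, i < j → j ≤ right → le (pvGetI nums i) (pvGetI nums j) = true) := by
  simp only [pvDq, List.mem_filter, List.mem_range, Bool.and_eq_true, decide_eq_true_eq,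
    List.all_eq_true, Bool.or_eq_true, Bool.not_eq_eq_eq_not, Bool.not_true, decide_eq_false_iff_not]
  constructor
  · rintro ⟨h1, h2, h3⟩
    exact ⟨by omega, h2, fun j hij hjr => ((h3 j (by omega)).resolve_left (by omega))⟩
  · rintro ⟨h1, h2, h3⟩
    refine ⟨by omega, h2, fun j hj => ?_⟩
    by_cases hij : i < j
    · exact Or.inr (h3 j hij (by omega))
    · exact Or.inl hij

theorem pvDq_ne_nil (nums : List Int) (le : Int → Int → Bool) (left right : Nat)
    (h : left ≤ right) : pvDq nums le left right ≠ [] := by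
  intro hnil
  have : right ∈ pvDq nums le left right := (pvDq_mem nums le left right right).mpr
    ⟨le_refl _, h, fun j hij hjr => by omega⟩
  simp [hnil] at this

theorem pvDq_pairwise_le (nums : List Int) (le : Int → Int → Bool) (left right : Nat) :
    (pvDq nums le left right).Pairwise (fun i j => le (pvGetI nums i) (pvGetI nums j) = true) := by
  have h := List.pairwise_lt_range (n := right+1)
  unfold pvDq
  rw [List.pairwise_filter]
  refine h.imp_of_mem ?_
  intro a b ha hb hab hpa hpb
  simp only [Bool.and_eq_true, List.all_eq_true, Bool.or_eq_true, Bool.not_eq_eq_eq_not,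
    Bool.not_true, decide_eq_false_iff_not, decide_eq_true_eq] at hpa
  exact (hpa.2 b hb).resolve_left (by omega)

theorem pvDq_sorted (nums : List Int) (le : Int → Int → Bool) (left right : Nat) :
    (pvDq nums le left right).Pairwise (· < ·) :=
  List.Pairwise.filter _ List.pairwise_lt_range

-- dropping from the back = filtering, when the kept predicate propagates backwards
theorem pvDropWhile_eq_filter {α : Type} (q : α → Bool) (l : List α)
    (h : l.Pairwise (fun a b => q a = true → q b = true)) :
    l.dropWhile (fun a => !q a) = l.filter q := by
  induction l with
  | nil => rfl
  | cons a t ih =>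
    rcases List.pairwise_cons.mp h with ⟨ha, ht⟩
    by_cases hq : q a = true
    · simp only [List.dropWhile, List.filter, hq, Bool.not_true]
      exact congrArg (a :: ·) (List.filter_eq_self.mpr fun b hb => ha b hb hq).symm
    · simp [List.dropWhile, List.filter, hq, ih ht]

theorem pvPopBack_eq_filter (nums : List Int) (le : Int → Int → Bool)
    (htr : pvTrans le) (x : Int) (left right : Nat) :
    pvPopBack (fun i => !(le (pvGetI nums i) x)) (pvDq nums le left right)
      = (pvDq nums le left right).filter (fun i => le (pvGetI nums i) x) := by
  unfold pvPopBack
  rw [pvDropWhile_eq_filter (fun i => le (pvGetI nums i) x)]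
  · rw [← List.filter_reverse, List.reverse_reverse]
  · rw [List.pairwise_reverse]
    exact (pvDq_pairwise_le nums le left right).imp_of_mem
      (fun ha hb hab hb' => htr _ _ _ hab hb')

theorem pvPush (nums : List Int) (le : Int → Int → Bool) (htr : pvTrans le)
    (left right : Nat) (hlr : left ≤ right + 1) :
    pvPopBack (fun i => !(le (pvGetI nums i) (pvGetI nums (right+1)))) (pvDq nums le left right) ++ [right+1]
      = pvDq nums le left (right+1) := by
  rw [pvPopBack_eq_filter nums le htr]
  conv_rhs => rw [pvDq, List.range_succ, List.filter_append]
  congr 1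
  · rw [pvDq, List.filter_filter]
    apply List.filter_congr
    intro i hi
    simp only [List.mem_range] at hi
    have hall : ((List.range (right+1) ++ [right+1]).all fun j => !decide (i < j) || le (pvGetI nums i) (pvGetI nums j))
        = (((List.range (right+1)).all fun j => !decide (i < j) || le (pvGetI nums i) (pvGetI nums j))
            && (!decide (i < right+1) || le (pvGetI nums i) (pvGetI nums (right+1)))) := by
      rw [List.all_append]; simp
    have h1 : (!decide (i < right + 1) || le (pvGetI nums i) (pvGetI nums (right+1)))
        = le (pvGetI nums i) (pvGetI nums (right+1)) := by
      simp [hi]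
    rw [hall, h1]
    cases decide (left ≤ i) <;> cases le (pvGetI nums i) (pvGetI nums (right+1)) <;>
      cases (List.range (right+1)).all (fun j => !decide (i < j) || le (pvGetI nums i) (pvGetI nums j)) <;> rfl
  · rw [List.filter_cons]
    have h2 : decide (left ≤ right + 1) = true := by simpa using hlr
    have h3 : ∀ j ∈ List.range (right+1), (!decide (right+1 < j) || le (pvGetI nums (right+1)) (pvGetI nums j)) = true := by
      intro j hj
      simp only [List.mem_range] at hj
      simp [Nat.not_lt.mpr (by omega : j ≤ right + 1)]
    simp [h2, List.all_eq_true.mpr h3]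

-- base case: pushing the first index into the empty deque
theorem pvPush0 (nums : List Int) (le : Int → Int → Bool) (p : Nat → Bool) :
    pvPopBack p [] ++ [0] = pvDq nums le 0 0 := by
  simp [pvPopBack, pvDq, List.range_succ]

theorem pvHead_mem (nums : List Int) (le : Int → Int → Bool) (left right : Nat)
    (h : left ≤ right) : (pvDq nums le left right).headD 0 ∈ pvDq nums le left right := by
  cases hdq : pvDq nums le left right with
  | nil => exact absurd hdq (pvDq_ne_nil nums le left right h)
  | cons a t => simp

theorem pvDq_exists_extremal (nums : List Int) (le : Int → Int → Bool)
    (htot : pvTot le) (htr : pvTrans le) (right : Nat) :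
    ∀ d left, right = left + d →
      ∃ m, m ∈ pvDq nums le left right ∧
        ∀ j, left ≤ j → j ≤ right → le (pvGetI nums m) (pvGetI nums j) = true := by
  intro d
  induction d with
  | zero =>
    intro left hl
    refine ⟨right, (pvDq_mem ..).mpr ⟨le_refl _, by omega, fun j h1 h2 => by omega⟩, ?_⟩
    intro j h1 h2
    have : j = right := by omega
    subst this
    exact (htot _ _).elim id id
  | succ d ih =>
    intro left hl
    obtain ⟨m, hm, hext⟩ := ih (left+1) (by omega)
    obtain ⟨hm1, hm2, hm3⟩ := (pvDq_mem ..).mp hm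
    rcases htot (pvGetI nums m) (pvGetI nums left) with hc | hc
    · refine ⟨m, (pvDq_mem ..).mpr ⟨hm1, by omega, hm3⟩, ?_⟩
      intro j h1 h2
      rcases Nat.eq_or_lt_of_le h1 with rfl | hlt
      · exact hc
      · exact hext j (by omega) h2
    · refine ⟨left, (pvDq_mem ..).mpr ⟨by omega, le_refl _, ?_⟩, ?_⟩
      · intro j hj1 hj2
        exact htr _ _ _ hc (hext j (by omega) hj2)
      · intro j h1 h2
        rcases Nat.eq_or_lt_of_le h1 with rfl | hlt
        · exact (htot _ _).elim id id
        · exact htr _ _ _ hc (hext j (by omega) h2)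

theorem pvHead_extremal (nums : List Int) (le : Int → Int → Bool)
    (htot : pvTot le) (htr : pvTrans le) (left right : Nat) (h : left ≤ right) :
    ∀ j, left ≤ j → j ≤ right →
      le (pvGetI nums ((pvDq nums le left right).headD 0)) (pvGetI nums j) = true := by
  obtain ⟨m, hm, hext⟩ := pvDq_exists_extremal nums le htot htr right (right - left) left (by omega)
  intro j h1 h2
  cases hdq : pvDq nums le left right with
  | nil => exact absurd hdq (pvDq_ne_nil nums le left right h)
  | cons a t =>
    simp only [List.headD_cons]
    rw [hdq] at hm
    rcases List.mem_cons.mp hm with rfl | hmt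
    · exact hext j h1 h2
    · have hp := pvDq_pairwise_le nums le left right
      rw [hdq, List.pairwise_cons] at hp
      exact htr _ _ _ (hp.1 m hmt) (hext j h1 h2)

theorem pvPopLeft (nums : List Int) (le : Int → Int → Bool) (left right : Nat)
    (h : left ≤ right) :
    (if (pvDq nums le left right).headD 0 < left + 1 then (pvDq nums le left right).tail
     else pvDq nums le left right) = pvDq nums le (left+1) right := by
  have hfil : pvDq nums le (left+1) right = (pvDq nums le left right).filter (fun i => decide (left+1 ≤ i)) := by
    rw [pvDq, pvDq, List.filter_filter]
    apply List.filter_congr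
    intro i _
    cases h1 : decide (left ≤ i) <;> cases h2 : decide (left+1 ≤ i) <;>
      cases h3 : (List.range (right+1)).all (fun j => !decide (i < j) || le (pvGetI nums i) (pvGetI nums j)) <;>
      simp_all <;> omega
  have hsort := pvDq_sorted nums le left right
  cases hdq : pvDq nums le left right with
  | nil => exact absurd hdq (pvDq_ne_nil nums le left right h)
  | cons a t =>
    rw [hdq] at hfil hsort
    rw [List.pairwise_cons] at hsort
    have ha : left ≤ a := by
      have := (pvDq_mem nums le left right a).mp (by rw [hdq]; simp)
      exact this.2.1
    simp only [List.headD_cons, List.tail_cons]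
    rw [hfil, List.filter_cons]
    by_cases hc : a < left + 1
    · rw [if_pos hc, if_neg (by simp only [decide_eq_true_eq]; omega)]
      exact (List.filter_eq_self.mpr (fun b hb => by
        have hb2 := hsort.1 b hb; simp only [decide_eq_true_eq]; omega)).symm
    · rw [if_neg hc, if_pos (by simp only [decide_eq_true_eq]; omega)]
      exact congrArg (a :: ·) (List.filter_eq_self.mpr (fun b hb => by
        have hb2 := hsort.1 b hb; simp only [decide_eq_true_eq]; omega)).symm

theorem pvWin_eq (nums : List Int) (left right : Nat) (hlr : left ≤ right)
    (hr : right < nums.length) :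
    pvWin nums left right = (List.range' left (right + 1 - left)).map (pvGetI nums) := by
  unfold pvWin
  have : ((right : Int) + 1) = ((right + 1 : Nat) : Int) := by push_cast; ring
  rw [this, PySem.List.slice_natCast]
  apply List.ext_getElem
  · simp; omega
  · intro k h1 h2
    simp only [List.getElem_take, List.getElem_drop, List.getElem_map, List.getElem_range']
    rw [pvGetI, List.getD_eq_getElem]
    · congr 1; omega
    · simp at h1 ⊢; omega

theorem pvMem_win (nums : List Int) (left right : Nat) (hlr : left ≤ right)
    (hr : right < nums.length) (y : Int) :
    y ∈ pvWin nums left right ↔ ∃ i, left ≤ i ∧ i ≤ right ∧ pvGetI nums i = y := by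
  rw [pvWin_eq nums left right hlr hr]
  simp only [List.mem_map, List.mem_range'_1]
  constructor
  · rintro ⟨i, ⟨h1, h2⟩, h3⟩; exact ⟨i, h1, by omega, h3⟩
  · rintro ⟨i, h1, h2, h3⟩; exact ⟨i, ⟨h1, by omega⟩, h3⟩

theorem pvMax_eq_head (nums : List Int) (left right : Nat) (hlr : left ≤ right)
    (hr : right < nums.length) :
    (PySem.List.max? (pvWin nums left right) (fun y => y)).getD 0
      = pvGetI nums ((pvDq nums (fun a b => decide (b ≤ a)) left right).headD 0) := by
  have hne : pvWin nums left right ≠ [] := by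
    rw [pvWin_eq nums left right hlr hr]
    simp; omega
  obtain ⟨m, hm⟩ : ∃ m, PySem.List.max? (pvWin nums left right) (fun y => y) = some m := by
    cases h : PySem.List.max? (pvWin nums left right) (fun y => y) with
    | none => exact absurd ((PySem.List.max?_eq_none_iff _ _).mp h) hne
    | some m => exact ⟨m, rfl⟩
  rw [hm, Option.getD_some]
  have hh0mem := (pvDq_mem ..).mp (pvHead_mem nums (fun a b => decide (b ≤ a)) left right hlr)
  have hext := pvHead_extremal nums (fun a b => decide (b ≤ a)) pvTot_ge pvTrans_ge left right hlr
  apply le_antisymm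
  · obtain ⟨i, h1, h2, h3⟩ := (pvMem_win nums left right hlr hr m).mp (PySem.List.max?_mem hm)
    have h4 := hext i h1 h2
    simp only [decide_eq_true_eq] at h4
    rw [h3] at h4
    exact h4
  · have : pvGetI nums ((pvDq nums (fun a b => decide (b ≤ a)) left right).headD 0) ∈ pvWin nums left right :=
      (pvMem_win nums left right hlr hr _).mpr ⟨_, hh0mem.2.1, hh0mem.1, rfl⟩
    exact PySem.List.max?_isMax hm _ this

theorem pvMin_eq_head (nums : List Int) (left right : Nat) (hlr : left ≤ right)
    (hr : right < nums.length) :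
    (PySem.List.min? (pvWin nums left right) (fun y => y)).getD 0
      = pvGetI nums ((pvDq nums (fun a b => decide (a ≤ b)) left right).headD 0) := by
  have hne : pvWin nums left right ≠ [] := by
    rw [pvWin_eq nums left right hlr hr]
    simp; omega
  obtain ⟨m, hm⟩ : ∃ m, PySem.List.min? (pvWin nums left right) (fun y => y) = some m := by
    cases h : PySem.List.min? (pvWin nums left right) (fun y => y) with
    | none => exact absurd ((PySem.List.min?_eq_none_iff _ _).mp h) hne
    | some m => exact ⟨m, rfl⟩
  rw [hm, Option.getD_some]
  have hh0mem := (pvDq_mem ..).mp (pvHead_mem nums (fun a b => decide (a ≤ b)) left right hlr)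
  have hext := pvHead_extremal nums (fun a b => decide (a ≤ b)) pvTot_le pvTrans_le left right hlr
  apply le_antisymm
  · have : pvGetI nums ((pvDq nums (fun a b => decide (a ≤ b)) left right).headD 0) ∈ pvWin nums left right :=
      (pvMem_win nums left right hlr hr _).mpr ⟨_, hh0mem.2.1, hh0mem.1, rfl⟩
    exact PySem.List.min?_isMin hm _ this
  · obtain ⟨i, h1, h2, h3⟩ := (pvMem_win nums left right hlr hr m).mp (PySem.List.min?_mem hm)
    have h4 := hext i h1 h2
    simp only [decide_eq_true_eq] at h4
    rw [h3] at h4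
    exact h4

theorem pvShrink_lockstep (nums : List Int) (limit : Int) (hlim : 0 ≤ limit)
    (right : Nat) (hr : right < nums.length) :
    ∀ fuel left, left ≤ right →
      pvShrinkA nums limit fuel
          (pvDq nums (fun a b => decide (a ≤ b)) left right)
          (pvDq nums (fun a b => decide (b ≤ a)) left right) left
        = (pvDq nums (fun a b => decide (a ≤ b)) (pvShrinkB nums limit fuel left right) right,
           pvDq nums (fun a b => decide (b ≤ a)) (pvShrinkB nums limit fuel left right) right,
           pvShrinkB nums limit fuel left right)
      ∧ pvShrinkB nums limit fuel left right ≤ right := by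
  intro fuel
  induction fuel with
  | zero => intro left hl; exact ⟨rfl, hl⟩
  | succ fuel ih =>
    intro left hl
    have hcond : (pvGetI nums ((pvDq nums (fun a b => decide (b ≤ a)) left right).headD 0)
        - pvGetI nums ((pvDq nums (fun a b => decide (a ≤ b)) left right).headD 0) > limit)
        ↔ ((PySem.List.max? (pvWin nums left right) (fun y => y)).getD 0
            - (PySem.List.min? (pvWin nums left right) (fun y => y)).getD 0 > limit) := by
      rw [pvMax_eq_head nums left right hl hr, pvMin_eq_head nums left right hl hr]
    by_cases hc : pvGetI nums ((pvDq nums (fun a b => decide (b ≤ a)) left right).headD 0)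
        - pvGetI nums ((pvDq nums (fun a b => decide (a ≤ b)) left right).headD 0) > limit
    · -- the window must still have more than one element
      have hlt : left < right := by
        rcases Nat.eq_or_lt_of_le hl with rfl | h
        · exfalso
          have h1 := (pvDq_mem nums (fun a b => decide (a ≤ b)) left left _).mp
            (pvHead_mem nums (fun a b => decide (a ≤ b)) left left le_rfl)
          have h2 := (pvDq_mem nums (fun a b => decide (b ≤ a)) left left _).mp
            (pvHead_mem nums (fun a b => decide (b ≤ a)) left left le_rfl)
          have e1 : (pvDq nums (fun a b => decide (a ≤ b)) left left).headD 0 = left := by omega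
          have e2 : (pvDq nums (fun a b => decide (b ≤ a)) left left).headD 0 = left := by omega
          rw [e1, e2] at hc
          omega
        · exact h
      have := ih (left+1) (by omega)
      simp only [pvShrinkA, pvShrinkB, if_pos hc, if_pos (hcond.mp hc),
        pvPopLeft nums _ left right hl] at this ⊢
      exact this
    · simp only [pvShrinkA, pvShrinkB, if_neg hc, if_neg (fun h => hc (hcond.mpr h))]
      exact ⟨by trivial, hl⟩

theorem pvLoop (nums : List Int) (limit : Int) (hlim : 0 ≤ limit) :
    ∀ k, k ≤ nums.length →
      (k = 0 ∧ (List.range k).foldl (pvStepA nums limit) ([], [], 0, 0) = ([], [], 0, 0)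
             ∧ (List.range k).foldl (pvStepB nums limit) (0, 0) = (0, 0))
      ∨ (1 ≤ k
         ∧ (List.range k).foldl (pvStepA nums limit) ([], [], 0, 0)
            = (pvDq nums (fun a b => decide (a ≤ b)) ((List.range k).foldl (pvStepB nums limit) (0, 0)).1 (k-1),
               pvDq nums (fun a b => decide (b ≤ a)) ((List.range k).foldl (pvStepB nums limit) (0, 0)).1 (k-1),
               ((List.range k).foldl (pvStepB nums limit) (0, 0)).1,
               ((List.range k).foldl (pvStepB nums limit) (0, 0)).2)
         ∧ ((List.range k).foldl (pvStepB nums limit) (0, 0)).1 ≤ k - 1) := by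
  intro k
  induction k with
  | zero => intro _; exact Or.inl ⟨rfl, rfl, rfl⟩
  | succ k ih =>
    intro hk
    have hkl : k < nums.length := by omega
    rcases ih (by omega) with ⟨hk0, hA, hB⟩ | ⟨hk1, hA, hB⟩
    · subst hk0
      right
      rw [List.range_succ, List.foldl_append, List.foldl_append, hA, hB]
      have hpush1 : pvPopBack (fun i => decide (pvGetI nums i > pvGetI nums 0)) [] ++ [0]
          = pvDq nums (fun a b => decide (a ≤ b)) 0 0 := pvPush0 ..
      have hpush2 : pvPopBack (fun i => decide (pvGetI nums i < pvGetI nums 0)) [] ++ [0]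
          = pvDq nums (fun a b => decide (b ≤ a)) 0 0 := pvPush0 ..
      have hls := pvShrink_lockstep nums limit hlim 0 hkl 1 0 le_rfl
      simp only [pvStepA, pvStepB, List.foldl_cons, List.foldl_nil, hpush1, hpush2, hls.1]
      refine ⟨le_rfl, by trivial, by have := hls.2; omega⟩
    · right
      rw [List.range_succ, List.foldl_append, List.foldl_append, hA]
      set l := ((List.range k).foldl (pvStepB nums limit) (0, 0)).1 with hldef
      have hfun1 : (fun i => decide (pvGetI nums i > pvGetI nums k))
          = fun i => !((fun a b => decide (a ≤ b)) (pvGetI nums i) (pvGetI nums k)) := by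
        funext i
        by_cases h : pvGetI nums i ≤ pvGetI nums k <;> simp [h] <;> omega
      have hfun2 : (fun i => decide (pvGetI nums i < pvGetI nums k))
          = fun i => !((fun a b => decide (b ≤ a)) (pvGetI nums i) (pvGetI nums k)) := by
        funext i
        by_cases h : pvGetI nums k ≤ pvGetI nums i <;> simp [h] <;> omega
      have hk1' : k - 1 + 1 = k := by omega
      have hpush1 := pvPush nums (fun a b => decide (a ≤ b)) pvTrans_le l (k-1) (by omega)
      have hpush2 := pvPush nums (fun a b => decide (b ≤ a)) pvTrans_ge l (k-1) (by omega)
      rw [hk1'] at hpush1 hpush2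
      have hls := pvShrink_lockstep nums limit hlim k hkl (k+1) l (by omega)
      simp only [List.foldl_cons, List.foldl_nil, pvStepA, pvStepB, Nat.add_sub_cancel]
      rw [← hldef, hfun1, hfun2, hpush1, hpush2, hls.1]
      refine ⟨by omega, by trivial, by have := hls.2; omega⟩

-- ===== VERDICT (by name: the statement is the Claim_ definition above) =====
theorem longest_subarray_absolute_diff_spec : Claim_equal_longest_subarray_absolute_diff := by
  intro nums limit _ hpre
  unfold Spec_longest_subarray_absolute_diff longest_subarray_absolute_diff longest_subarray_absolute_diff_alt
  rcases hpre with rfl | hlim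
  · rfl
  · rcases pvLoop nums limit hlim nums.length le_rfl with ⟨h0, hA, hB⟩ | ⟨_, hA, hB⟩
    · rw [hA, hB]
    · rw [hA]
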